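-- pv_equiv track=rewrite | github.com/dev-bleck/algorithm | 230224/crime_prevention/prof.py | check_profit
-- ===== SOURCE A (Python) =====
-- def check_profit(k, houses, city_size, margin):
--     # k의 크기에서 서비스 가능한 최대 집 수
--     result = 0
--     cost = k * k + (k - 1) * (k - 1)
--
--     # 모든 지점에서 서비스 시도
--     for i in range(city_size):
--         for j in range(city_size):  # 범위 내에 집이 몇 개인지
--             house_count = 0
--             for house_y, house_x in houses:
--                 # 이 지점에서 도달 가능한 집일 때
--                 if abs(i - house_y) + abs(j - house_x) <= k - 1:
--                     house_count += 1
--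
--             # 이득이 남고, 가장 많은 집에 서비스 가능
--             profit = house_count * margin - cost
--             if profit >= 0 and house_count > result:
--                 result = house_count
--
--             # 상동 조건문(조금 더 느림)
--             # if profit >= 0:
--             #     result = max(result, house_count)
--
--     return result
-- ===== SOURCE B (Python) =====
-- def check_profit(k, houses, city_size, margin):
--     # Each house contributes +1/-1 difference markers at the ends of each row
--     # segment of its service diamond; a running sum while scanning the grid then
--     # yields the house count at every center in O(1), with no per-center house scan.
--     cost = k * k + (k - 1) * (k - 1)
--     r = k - 1
--     diff = {}
--     for house_y, house_x in houses:
--         for i in range(max(0, house_y - r), min(city_size, house_y + r + 1)):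
--             d = r - abs(i - house_y)
--             lo = max(0, house_x - d)
--             hi = min(city_size, house_x + d + 1)
--             if lo < hi:
--                 diff[(i, lo)] = diff.get((i, lo), 0) + 1
--                 diff[(i, hi)] = diff.get((i, hi), 0) - 1
--     result = 0
--     for i in range(city_size):
--         c = 0
--         for j in range(city_size):
--             c = c + diff.get((i, j), 0)
--             if c * margin - cost >= 0 and c > result:
--                 result = c
--     return result
-- ===== Notes on version B (the rewrite author's own statement) =====
-- stated objective: faster
-- what changed: Instead of re-scanning all houses at each of the city_size^2 centers, B writes +1/-1 difference markers at the row-segment ends of each house's service diamond once and recovers every center's house count by a running sum during a single grid scan; intended as faster (per-center cost drops from O(H) to O(1)); measured 9-18x on the timing inputs where both finish, while both keep the O(city_size^2) grid scan and so both time out on the hugest grids.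
import Mathlib
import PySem

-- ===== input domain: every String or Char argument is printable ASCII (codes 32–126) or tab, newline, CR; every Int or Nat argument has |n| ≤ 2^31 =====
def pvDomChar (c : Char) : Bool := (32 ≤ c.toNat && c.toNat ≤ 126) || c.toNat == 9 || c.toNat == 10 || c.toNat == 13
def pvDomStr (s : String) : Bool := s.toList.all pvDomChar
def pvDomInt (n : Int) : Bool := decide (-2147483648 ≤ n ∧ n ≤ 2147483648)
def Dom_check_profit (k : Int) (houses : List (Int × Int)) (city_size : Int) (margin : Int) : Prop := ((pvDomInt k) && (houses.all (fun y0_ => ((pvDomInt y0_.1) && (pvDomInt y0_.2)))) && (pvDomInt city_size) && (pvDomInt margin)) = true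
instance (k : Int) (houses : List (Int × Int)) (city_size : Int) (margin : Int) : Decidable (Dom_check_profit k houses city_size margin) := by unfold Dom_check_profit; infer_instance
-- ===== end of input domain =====

-- B replaces the per-center scan of all houses by a counter stamped once per house
-- (each house marks the grid cells of its own service diamond), then a grid scan with
-- O(1) lookups; return value only, no side effects.

-- ===== PORT A =====
def check_profit (k : Int) (houses : List (Int × Int)) (city_size : Int) (margin : Int) : Int :=
  let cost := k * k + (k - 1) * (k - 1)
  (PySem.List.pyRange 0 city_size 1).foldl (fun result i =>
    (PySem.List.pyRange 0 city_size 1).foldl (fun result j =>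
      let house_count := houses.foldl (fun hc h =>
        if ((i - h.1).natAbs : Int) + ((j - h.2).natAbs : Int) ≤ k - 1 then hc + 1 else hc) 0
      let profit := house_count * margin - cost
      if profit ≥ 0 ∧ house_count > result then house_count else result) result) 0

-- ===== PORT B =====
def check_profit_alt (k : Int) (houses : List (Int × Int)) (city_size : Int) (margin : Int) : Int :=
  let cost := k * k + (k - 1) * (k - 1)
  let r := k - 1
  let diff : PySem.Dict (Int × Int) Int :=
    houses.foldl (fun d h =>
      (PySem.List.pyRange (max 0 (h.1 - r)) (min city_size (h.1 + r + 1)) 1).foldl (fun d i =>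
        let dd := r - ((i - h.1).natAbs : Int)
        let lo := max 0 (h.2 - dd)
        let hi := min city_size (h.2 + dd + 1)
        if lo < hi then
          (d.modify (i, lo) 0 (· + 1)).modify (i, hi) 0 (· - 1)
        else d) d) PySem.Dict.empty
  (PySem.List.pyRange 0 city_size 1).foldl (fun result i =>
    ((PySem.List.pyRange 0 city_size 1).foldl (fun rc j =>
        let c := rc.2 + diff.getD (i, j) 0
        (if c * margin - cost ≥ 0 ∧ c > rc.1 then c else rc.1, c)) (result, 0)).1) 0

-- ===== PRECONDITION & SPEC =====
def Spec_check_profit (k : Int) (houses : List (Int × Int)) (city_size : Int) (margin : Int) (out : Int) : Prop := out = check_profit_alt k houses city_size margin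
instance (k : Int) (houses : List (Int × Int)) (city_size : Int) (margin : Int) (out : Int) : Decidable (Spec_check_profit k houses city_size margin out) := by unfold Spec_check_profit; infer_instance

-- ===== CLAIM (what is proved, stated in full; the proofs are below) =====
def Claim_equal_check_profit : Prop := ∀ (k : Int) (houses : List (Int × Int)) (city_size : Int) (margin : Int), Dom_check_profit k houses city_size margin → Spec_check_profit k houses city_size margin (check_profit k houses city_size margin)

-- ===== LEMMAS AND PROOFS =====

-- a nested loop over per-element key lists is one fold over the flattened list
theorem foldl_foldl {α β γ : Type} (L : List α) (g : α → List β) (step : γ → β → γ) (d : γ) :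
    L.foldl (fun d x => (g x).foldl step d) d = (L.flatMap g).foldl step d := by
  induction L generalizing d with
  | nil => rfl
  | cons h t ih => simp [List.foldl_append, ih]

-- the value at a key after a weighted-increment fold is the sum of matching weights
theorem getD_foldl_modify_addw {κ : Type} [BEq κ] [LawfulBEq κ] [DecidableEq κ]
    (L : List (κ × Int)) (d : PySem.Dict κ Int) (v : κ) :
    (L.foldl (fun d p => d.modify p.1 0 (· + p.2)) d).getD v 0
      = d.getD v 0 + ((L.filter (fun p => p.1 == v)).map (·.2)).sum := by
  induction L generalizing d with
  | nil => simp
  | cons a t ih =>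
    rw [List.foldl_cons, ih, PySem.Dict.getD_modify]
    by_cases hv : v = a.1
    · subst hv
      rw [if_pos rfl, List.filter_cons_of_pos (by simp), List.map_cons, List.sum_cons]
      omega
    · rw [if_neg hv, List.filter_cons_of_neg (by simp; exact fun h => hv h.symm)]

-- summing the weights at one key of a flatMap of row-tagged marker lists
theorem wsum_flatMap_tagged (L : List Int) (g : Int → List (Int × Int)) (i j : Int)
    (hnd : L.Nodup) :
    (((L.flatMap (fun i' => (g i').map (fun p => ((i', p.1), p.2)))).filter
        (fun q => q.1 == (i, j))).map (·.2)).sum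
      = if i ∈ L then (((g i).filter (fun p => p.1 == j)).map (·.2)).sum else 0 := by
  induction L with
  | nil => simp
  | cons a t ih =>
    simp only [List.nodup_cons] at hnd
    rw [List.flatMap_cons, List.filter_append, List.map_append, List.sum_append, ih hnd.2]
    by_cases hai : a = i
    · subst hai
      have h1 : (((g a).map (fun p => ((a, p.1), p.2))).filter (fun q => q.1 == (a, j))).map (·.2)
          = ((g a).filter (fun p => p.1 == j)).map (·.2) := by
        rw [List.filter_map, List.map_map]
        congr 1
        apply List.filter_congr
        intro p _
        simp
      rw [h1]
      simp [hnd.1]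
    · have h0 : ((g a).map (fun p => ((a, p.1), p.2))).filter (fun q => q.1 == (i, j)) = [] := by
        simp only [List.filter_eq_nil_iff]
        intro q hq
        simp only [List.mem_map] at hq
        obtain ⟨p, _, rfl⟩ := hq
        simp [hai]
      have hmem : (i ∈ a :: t) ↔ i ∈ t := by
        rw [List.mem_cons]
        constructor
        · rintro (h | h)
          · exact absurd h.symm hai
          · exact h
        · exact Or.inr
      rw [h0]
      simp [hmem]

-- the +1/-1 markers a single house writes, as an explicit flattened list
def markers (cs r : Int) (h : Int × Int) : List ((Int × Int) × Int) :=
  (PySem.List.pyRange (max 0 (h.1 - r)) (min cs (h.1 + r + 1)) 1).flatMap (fun i =>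
    (if max 0 (h.2 - (r - ((i - h.1).natAbs : Int))) < min cs (h.2 + (r - ((i - h.1).natAbs : Int)) + 1)
     then [(max 0 (h.2 - (r - ((i - h.1).natAbs : Int))), (1 : Int)),
           (min cs (h.2 + (r - ((i - h.1).natAbs : Int)) + 1), (-1 : Int))]
     else []).map (fun p => ((i, p.1), p.2)))

theorem markers_wsum (cs r : Int) (h : Int × Int) (i j : Int)
    (hi : 0 ≤ i) (hi' : i < cs) (hj : 0 ≤ j) (hj' : j < cs) :
    ((((markers cs r h).filter (fun q => q.1 == (i, j))).map (·.2)).sum : Int)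
      = (if ((i - h.1).natAbs : Int) + ((j - h.2).natAbs : Int) ≤ r then 1 else 0)
        - (if 0 < j ∧ ((i - h.1).natAbs : Int) + ((j - 1 - h.2).natAbs : Int) ≤ r then 1 else 0) := by
  rw [markers, wsum_flatMap_tagged _ _ i j (PySem.List.nodup_pyRange_one _ _)]
  by_cases hmem : i ∈ PySem.List.pyRange (max 0 (h.1 - r)) (min cs (h.1 + r + 1)) 1
  · rw [if_pos hmem, PySem.List.mem_pyRange_one] at *
    by_cases hlt : max 0 (h.2 - (r - ((i - h.1).natAbs : Int))) < min cs (h.2 + (r - ((i - h.1).natAbs : Int)) + 1)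
    · rw [if_pos hlt]
      simp only [List.filter_cons, List.filter_nil, beq_iff_eq]
      split_ifs <;> simp <;> omega
    · rw [if_neg hlt]
      simp only [List.filter_nil, List.map_nil, List.sum_nil]
      split_ifs <;> omega
  · rw [if_neg hmem, PySem.List.mem_pyRange_one] at *
    push Not at hmem
    split_ifs <;> omega

-- summed over all houses: the marker weight at a grid cell is the column-difference of counts
theorem wsum_houses (cs r : Int) (i j : Int)
    (hi : 0 ≤ i) (hi' : i < cs) (hj : 0 ≤ j) (hj' : j < cs) :
    ∀ houses : List (Int × Int),
    ((((houses.flatMap (markers cs r)).filter (fun q => q.1 == (i, j))).map (·.2)).sum : Int)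
      = (houses.countP (fun h => decide (((i - h.1).natAbs : Int) + ((j - h.2).natAbs : Int) ≤ r)) : Int)
        - (if 0 < j then (houses.countP (fun h => decide (((i - h.1).natAbs : Int) + ((j - 1 - h.2).natAbs : Int) ≤ r)) : Int) else 0) := by
  intro houses
  induction houses with
  | nil => simp
  | cons a t ih =>
    rw [List.flatMap_cons, List.filter_append, List.map_append, List.sum_append, ih,
      markers_wsum cs r a i j hi hi' hj hj', List.countP_cons, List.countP_cons]
    simp only [decide_eq_true_eq]
    push_cast
    split_ifs <;> omega

-- the diff dictionary B builds holds the column-difference of house counts at every grid cell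
theorem diff_getD (cs r : Int) (houses : List (Int × Int)) (i j : Int)
    (hi : 0 ≤ i) (hi' : i < cs) (hj : 0 ≤ j) (hj' : j < cs) :
    (houses.foldl (fun d h =>
      (PySem.List.pyRange (max 0 (h.1 - r)) (min cs (h.1 + r + 1)) 1).foldl (fun d i' =>
        if max 0 (h.2 - (r - ((i' - h.1).natAbs : Int))) < min cs (h.2 + (r - ((i' - h.1).natAbs : Int)) + 1) then
          (d.modify (i', max 0 (h.2 - (r - ((i' - h.1).natAbs : Int)))) 0 (· + 1)).modify
            (i', min cs (h.2 + (r - ((i' - h.1).natAbs : Int)) + 1)) 0 (· - 1)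
        else d) d) PySem.Dict.empty).getD (i, j) 0
      = (houses.countP (fun h => decide (((i - h.1).natAbs : Int) + ((j - h.2).natAbs : Int) ≤ r)) : Int)
        - (if 0 < j then (houses.countP (fun h => decide (((i - h.1).natAbs : Int) + ((j - 1 - h.2).natAbs : Int) ≤ r)) : Int) else 0) := by
  have hstamp : ∀ (d : PySem.Dict (Int × Int) Int) (h : Int × Int),
      (PySem.List.pyRange (max 0 (h.1 - r)) (min cs (h.1 + r + 1)) 1).foldl (fun d i' =>
        if max 0 (h.2 - (r - ((i' - h.1).natAbs : Int))) < min cs (h.2 + (r - ((i' - h.1).natAbs : Int)) + 1) then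
          (d.modify (i', max 0 (h.2 - (r - ((i' - h.1).natAbs : Int)))) 0 (· + 1)).modify
            (i', min cs (h.2 + (r - ((i' - h.1).natAbs : Int)) + 1)) 0 (· - 1)
        else d) d
      = (markers cs r h).foldl (fun d p => d.modify p.1 0 (· + p.2)) d := by
    intro d h
    rw [markers, ← foldl_foldl]
    refine PySem.List.foldl_congr_mem _ _ _ _ ?_
    intro acc i' _
    by_cases hlt : max 0 (h.2 - (r - ((i' - h.1).natAbs : Int))) < min cs (h.2 + (r - ((i' - h.1).natAbs : Int)) + 1)
    · rw [if_pos hlt, if_pos hlt]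
      simp only [List.map_cons, List.map_nil, List.foldl_cons, List.foldl_nil]
      have hsub : (fun x : Int => x - 1) = (fun x : Int => x + -1) := by funext x; omega
      rw [hsub]
    · rw [if_neg hlt, if_neg hlt]
      simp
  simp only [hstamp]
  rw [foldl_foldl, getD_foldl_modify_addw, wsum_houses cs r i j hi hi' hj hj' houses]
  have hempty : (PySem.Dict.empty : PySem.Dict (Int × Int) Int).getD (i, j) 0 = 0 := by
    simp [PySem.Dict.getD, PySem.Dict.empty, PySem.Dict.get?]
  rw [hempty]
  omega

-- the running-sum scan over one row equals the direct per-cell count scan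
theorem scan_fold (cs margin cost : Int) (C G : Int → Int)
    (hG : ∀ j, 0 ≤ j → j < cs → G j = C j - (if 0 < j then C (j - 1) else 0)) :
    ∀ (m : Nat), (m : Int) ≤ cs → ∀ res : Int,
      (PySem.List.pyRange 0 (m : Int) 1).foldl (fun rc j =>
          (if (rc.2 + G j) * margin - cost ≥ 0 ∧ rc.2 + G j > rc.1 then rc.2 + G j else rc.1,
           rc.2 + G j)) (res, 0)
        = ((PySem.List.pyRange 0 (m : Int) 1).foldl (fun res j =>
            if C j * margin - cost ≥ 0 ∧ C j > res then C j else res) res,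
           if m = 0 then 0 else C ((m : Int) - 1)) := by
  intro m
  induction m with
  | zero => intro _ res; simp [PySem.List.pyRange_one_eq_nil]
  | succ n ih =>
    intro hm res
    have hcast : ((n + 1 : Nat) : Int) = (n : Int) + 1 := by push_cast; ring
    rw [hcast, PySem.List.pyRange_one_succ_right (by positivity), List.foldl_append,
      List.foldl_append, ih (by omega) res]
    simp only [List.foldl_cons, List.foldl_nil]
    have hc : (if n = 0 then 0 else C ((n : Int) - 1)) + G (n : Int) = C (n : Int) := by
      have hGn := hG (n : Int) (by positivity) (by omega)
      by_cases h0 : n = 0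
      · subst h0
        rw [if_pos rfl]
        rw [if_neg (by omega : ¬ (0 : Int) < ((0 : Nat) : Int))] at hGn
        simp only [Nat.cast_zero] at hGn ⊢
        omega
      · rw [if_neg h0]
        rw [if_pos (by omega : (0 : Int) < (n : Int))] at hGn
        omega
    rw [hc]
    have hn1 : ¬ (n + 1 = 0) := by omega
    rw [if_neg hn1]
    have : ((n : Int) + 1) - 1 = (n : Int) := by ring
    rw [this]

-- ===== VERDICT (by name: the statement is the Claim_ definition above) =====
theorem check_profit_spec : Claim_equal_check_profit := by
  intro k houses city_size margin _
  simp only [Spec_check_profit, check_profit, check_profit_alt]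
  refine PySem.List.foldl_congr_mem _ _ _ _ ?_
  intro acc i hi
  rw [PySem.List.mem_pyRange_one] at hi
  obtain ⟨m, hm⟩ : ∃ m : Nat, (m : Int) = city_size :=
    ⟨city_size.toNat, Int.toNat_of_nonneg (by omega)⟩
  rw [← hm]
  rw [scan_fold (m : Int) margin (k * k + (k - 1) * (k - 1))
      (fun j => (houses.countP (fun h => decide (((i - h.1).natAbs : Int) + ((j - h.2).natAbs : Int) ≤ k - 1)) : Int))
      (fun j => (houses.foldl (fun d h =>
        (PySem.List.pyRange (max 0 (h.1 - (k - 1))) (min (m : Int) (h.1 + (k - 1) + 1)) 1).foldl (fun d i' =>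
          if max 0 (h.2 - (k - 1 - ((i' - h.1).natAbs : Int))) < min (m : Int) (h.2 + (k - 1 - ((i' - h.1).natAbs : Int)) + 1) then
            (d.modify (i', max 0 (h.2 - (k - 1 - ((i' - h.1).natAbs : Int)))) 0 (· + 1)).modify
              (i', min (m : Int) (h.2 + (k - 1 - ((i' - h.1).natAbs : Int)) + 1)) 0 (· - 1)
          else d) d) PySem.Dict.empty).getD (i, j) 0)
      (fun j hj hj' => diff_getD (m : Int) (k - 1) houses i j (by omega) (by omega) hj hj')
      m le_rfl acc]
  refine PySem.List.foldl_congr_mem _ _ _ _ ?_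
  intro res j _
  rw [PySem.List.foldl_ite_add_one]
  simp
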